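-- pv_equiv track=rewrite | github.com/VelansRex/Gra-w-Pygame-Zero-z-DualSense | libraries/EduSense/General.py | ascii_to_int
-- ===== SOURCE A (Python) =====
-- def ascii_to_int(data):  # convert str to int. Work also with 1 ASCII char (1/2 byte, value 0 - 0xF)
--     value = 0
--     for i in data:
--         temp = i - 0x30
--         if temp > 9:
--             temp -= 0x41 - 0x30 - 10
--         value *= 16
--         value += temp
--     return value
-- ===== SOURCE B (Python) =====
-- def ascii_to_int(data):  # back-to-front positional sum with a running power of 16 (A goes front-to-back with Horner multiply-accumulate)
--     value = 0
--     power = 1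
--     for i in reversed(data):
--         d = i - 0x30
--         if d <= 9:
--             value += d * power
--         else:
--             value += (d - 7) * power
--         power *= 16
--     return value
-- ===== Notes on version B (the rewrite author's own statement) =====
-- stated objective: alternative
-- what changed: Replaces A's front-to-back Horner multiply-accumulate with a back-to-front traversal that adds each digit times a running positional power of 16, carrying two accumulators (value, power).
import Mathlib
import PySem

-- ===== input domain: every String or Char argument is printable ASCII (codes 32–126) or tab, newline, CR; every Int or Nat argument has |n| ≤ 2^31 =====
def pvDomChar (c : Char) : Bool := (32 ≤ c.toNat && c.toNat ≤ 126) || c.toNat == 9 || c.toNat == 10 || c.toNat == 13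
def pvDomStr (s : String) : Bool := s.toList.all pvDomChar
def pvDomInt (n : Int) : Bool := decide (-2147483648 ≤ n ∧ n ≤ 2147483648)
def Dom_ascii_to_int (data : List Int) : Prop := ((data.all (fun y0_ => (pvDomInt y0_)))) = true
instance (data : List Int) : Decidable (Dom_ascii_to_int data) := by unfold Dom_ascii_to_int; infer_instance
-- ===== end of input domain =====

-- B replaces A's front-to-back Horner multiply-accumulate with a back-to-front positional sum carrying a running power of 16 (alternative decomposition, same cost).

-- ===== PORT A =====
def ascii_to_int (data : List Int) : Int :=
  data.foldl (fun value i =>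
    let temp := i - 0x30
    let temp := if temp > 9 then temp - (0x41 - 0x30 - 10) else temp
    value * 16 + temp) 0

-- ===== PORT B =====
def ascii_to_int_alt (data : List Int) : Int :=
  (data.reverse.foldl (fun (vp : Int × Int) i =>
    let d := i - 0x30
    let value := if d ≤ 9 then vp.1 + d * vp.2 else vp.1 + (d - 7) * vp.2
    (value, vp.2 * 16)) (0, 1)).1

-- ===== PRECONDITION & SPEC =====
def Spec_ascii_to_int (data : List Int) (out : Int) : Prop := out = ascii_to_int_alt data
instance (data : List Int) (out : Int) : Decidable (Spec_ascii_to_int data out) := by unfold Spec_ascii_to_int; infer_instance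

-- ===== CLAIM (what is proved, stated in full; the proofs are below) =====
def Claim_equal_ascii_to_int : Prop := ∀ (data : List Int), Dom_ascii_to_int data → Spec_ascii_to_int data (ascii_to_int data)

-- ===== LEMMAS AND PROOFS =====

def pvDigit (i : Int) : Int := if i - 0x30 ≤ 9 then i - 0x30 else i - 0x30 - 7

-- A's Horner fold with an arbitrary starting accumulator
lemma horner_acc (ds : List Int) (a : Int) :
    ds.foldl (fun v t => v * 16 + pvDigit t) a
      = a * 16 ^ ds.length + ds.foldl (fun v t => v * 16 + pvDigit t) 0 := by
  induction ds generalizing a with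
  | nil => simp
  | cons d ds ih =>
    simp only [List.foldl_cons, List.length_cons]
    rw [ih (a * 16 + pvDigit d), ih (0 * 16 + pvDigit d)]
    ring

-- B's reversed fold computes (Horner value, 16 ^ length)
lemma rev_fold (ds : List Int) :
    ds.reverse.foldl (fun (vp : Int × Int) i => (vp.1 + pvDigit i * vp.2, vp.2 * 16)) (0, 1)
      = (ds.foldl (fun v t => v * 16 + pvDigit t) 0, 16 ^ ds.length) := by
  induction ds with
  | nil => simp
  | cons d ds ih =>
    rw [List.reverse_cons, List.foldl_append, ih]
    simp only [List.foldl_cons, List.foldl_nil, List.length_cons]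
    rw [horner_acc ds (0 * 16 + pvDigit d)]
    exact Prod.ext (by ring) (by ring)

theorem ascii_to_int_spec : Claim_equal_ascii_to_int := by
  intro data _
  unfold Spec_ascii_to_int ascii_to_int ascii_to_int_alt
  have hfunA : (fun (value i : Int) =>
      let temp := i - 0x30
      let temp := if temp > 9 then temp - (0x41 - 0x30 - 10) else temp
      value * 16 + temp) = fun v i => v * 16 + pvDigit i := by
    funext v i
    simp only [pvDigit]
    split_ifs <;> omega
  have hfunB : (fun (vp : Int × Int) (i : Int) =>
      let d := i - 0x30
      let value := if d ≤ 9 then vp.1 + d * vp.2 else vp.1 + (d - 7) * vp.2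
      (value, vp.2 * 16)) = fun vp i => (vp.1 + pvDigit i * vp.2, vp.2 * 16) := by
    funext vp i
    simp only [pvDigit]
    split_ifs <;> simp [mul_comm]
  rw [hfunA, hfunB, rev_fold]
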